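-- pv_equiv track=rewrite | github.com/palchhinparihar/codedex-daily-challenge | code/day29.py | emoticons_mood
-- ===== SOURCE A (Python) =====
-- def emoticons_mood(message):
--   # edge case
--   if len(message) == 0:
--     return 0
--
--   message = message.lower() # message into lowercase
--   score = 0 # overall mood based score
--
--   happy = [":)", ":p", "xd", ":3", "<3", "\\m/"] # happy emoticons
--   sad = [":(", ":'(", "t(-.-t)"] # sad emoticons
--
--   # count happy emoticons
--   for emo in happy:
--     count = len(message.split(emo)) - 1
--     score += count
--
--   # count sad emoticons
--   for emo in sad:
--     count = len(message.split(emo)) - 1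
--     score -= count
--
--   return score
-- ===== SOURCE B (Python) =====
-- def emoticons_mood(message):
--   msg = message.lower()
--   happy = (":)", ":p", "xd", ":3", "<3", "\\m/")
--   sad = (":(", ":'(", "t(-.-t)")
--   score = 0
--   for i in range(len(msg)):
--     for emo in happy:
--       if msg.startswith(emo, i):
--         score += 1
--     for emo in sad:
--       if msg.startswith(emo, i):
--         score -= 1
--   return score
-- ===== Notes on version B (the rewrite author's own statement) =====
-- stated objective: alternative
-- what changed: Replaces the nine per-pattern split-and-count passes with a single index-walking scan that tests every happy/sad pattern with startswith at each position (valid because none of the fixed patterns self-overlaps), and drops the redundant empty-string guard.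
import Mathlib
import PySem

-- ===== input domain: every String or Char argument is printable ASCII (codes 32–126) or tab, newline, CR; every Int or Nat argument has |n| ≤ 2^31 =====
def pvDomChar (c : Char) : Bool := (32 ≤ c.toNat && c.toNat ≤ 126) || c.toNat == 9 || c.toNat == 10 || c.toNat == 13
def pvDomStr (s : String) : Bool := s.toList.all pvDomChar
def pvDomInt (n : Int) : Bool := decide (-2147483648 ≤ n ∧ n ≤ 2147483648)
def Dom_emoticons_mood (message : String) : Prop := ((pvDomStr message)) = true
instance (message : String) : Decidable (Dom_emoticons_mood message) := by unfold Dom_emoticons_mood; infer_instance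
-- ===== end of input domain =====

-- B replaces A's nine per-pattern split passes by one index-walking scan testing every pattern at each position; alternative decomposition, same cost.


-- the fixed emoticon tables of the Python sources (shared data)
def pvHappy : List String := [":)", ":p", "xd", ":3", "<3", "\\m/"]
def pvSad : List String := [":(", ":'(", "t(-.-t)"]

-- ===== PORT A =====
def emoticons_mood (message : String) : Int :=
  if PySem.Str.len message = 0 then 0
  else
    let m := PySem.Str.lower message
    let score : Int := 0
    -- message.split(emo): the separators are nonempty literals, so split? is always `some`
    let score := pvHappy.foldl
      (fun sc emo => sc + ((((PySem.Str.split? m emo).getD []).length : Int) - 1)) score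
    let score := pvSad.foldl
      (fun sc emo => sc - ((((PySem.Str.split? m emo).getD []).length : Int) - 1)) score
    score

-- ===== PORT B =====
def emoticons_mood_alt (message : String) : Int :=
  let m := (PySem.Str.lower message).toList
  -- msg.startswith(emo, i): exact as a prefix test on the drop, since every i of range(len(msg)) is ≥ 0
  (PySem.List.pyRange 0 (m.length : Int) 1).foldl (fun score i =>
    let score := pvHappy.foldl
      (fun s emo => if PySem.Chars.startswith (m.drop i.toNat) emo.toList then s + 1 else s) score
    pvSad.foldl
      (fun s emo => if PySem.Chars.startswith (m.drop i.toNat) emo.toList then s - 1 else s) score) 0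

-- ===== PRECONDITION & SPEC =====
def Spec_emoticons_mood (message : String) (out : Int) : Prop := out = emoticons_mood_alt message
instance (message : String) (out : Int) : Decidable (Spec_emoticons_mood message out) := by unfold Spec_emoticons_mood; infer_instance

-- ===== CLAIM (what is proved, stated in full; the proofs are below) =====
def Claim_equal_emoticons_mood : Prop := ∀ (message : String), Dom_emoticons_mood message → Spec_emoticons_mood message (emoticons_mood message)

-- ===== LEMMAS AND PROOFS =====

-- number of positions of m at which p occurs (what B counts)
def pvOcc (p m : List Char) : Nat :=
  List.countP (fun i => p.isPrefixOf (m.drop i)) (List.range m.length)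

-- fuelled non-overlapping left-to-right match counter, mirroring PySem.Chars.splitOn.go (what A counts)
def pvCntGo (p : List Char) : Nat → List Char → Nat
  | 0, _ => 0
  | _ + 1, [] => 0
  | fuel + 1, c :: rest =>
    if p.isPrefixOf (c :: rest) then pvCntGo p fuel ((c :: rest).drop p.length) + 1
    else pvCntGo p fuel rest

-- p has no nontrivial border: no proper suffix of p is also a prefix of p
def pvNoBorder (p : List Char) : Prop :=
  ((List.range p.length).all (fun k => decide (k = 0) || !(p.drop k).isPrefixOf p)) = true

theorem pv_prefix_take {p w : List Char} (h : p <+: w) {j : Nat} (hj : j ≤ p.length) :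
    w.take j = p.take j := by
  obtain ⟨t, rfl⟩ := h
  rw [List.take_append_of_le_length hj]

-- two occurrences of a border-free p cannot overlap
theorem pv_no_overlap {p s : List Char} (hb : pvNoBorder p) (h : p <+: s)
    {k : Nat} (hk0 : 0 < k) (hk : k < p.length) : ¬ p.isPrefixOf (s.drop k) := by
  intro hpre
  obtain ⟨t, rfl⟩ := h
  rw [List.isPrefixOf_iff_prefix] at hpre
  rw [List.drop_append, Nat.sub_eq_zero_of_le (le_of_lt hk), List.drop_zero] at hpre
  have hlen : (p.drop k).length ≤ p.length := by simp [List.length_drop]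
  have htake : ((p.drop k) ++ t).take (p.drop k).length = p.take (p.drop k).length :=
    pv_prefix_take hpre hlen
  rw [List.take_append_of_le_length (le_refl _), List.take_length] at htake
  have hpref : (p.drop k).isPrefixOf p := by
    rw [List.isPrefixOf_iff_prefix, htake]
    exact List.take_prefix _ _
  have hball := List.all_eq_true.mp hb k (List.mem_range.mpr hk)
  have hk0' : k ≠ 0 := Nat.pos_iff_ne_zero.mp hk0
  simp [hk0'] at hball
  rw [hpref] at hball
  simp at hball

theorem pvOcc_cons (p : List Char) (c : Char) (rest : List Char) :
    pvOcc p (c :: rest) = (if p.isPrefixOf (c :: rest) then 1 else 0) + pvOcc p rest := by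
  unfold pvOcc
  rw [List.length_cons, List.range_succ_eq_map, List.countP_cons, List.countP_map]
  have : ((fun i => p.isPrefixOf (List.drop i (c :: rest))) ∘ Nat.succ)
       = (fun i => p.isPrefixOf (List.drop i rest)) := by
    funext i; simp [Function.comp, List.drop_succ_cons]
  rw [this]
  simp [Nat.add_comm]

theorem pvOcc_drop_stable (p l : List Char) (j : Nat)
    (h : ∀ i, 0 < i → i ≤ j → ¬ p.isPrefixOf (l.drop i)) :
    pvOcc p (l.drop 1) = pvOcc p (l.drop (j + 1)) := by
  induction j with
  | zero => rfl
  | succ j ih =>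
    rw [ih (fun i hi hij => h i hi (Nat.le_succ_of_le hij))]
    cases hd : l.drop (j + 1) with
    | nil =>
      have h2 : l.drop (j + 1 + 1) = [] := by
        rw [List.drop_eq_nil_iff] at hd ⊢; omega
      rw [h2]
    | cons c tail =>
      have htail : l.drop (j + 1 + 1) = tail := by
        rw [← List.drop_drop (j := j + 1) (i := 1), hd]; rfl
      rw [htail, pvOcc_cons, if_neg, Nat.zero_add]
      rw [← hd]
      exact h (j + 1) (Nat.succ_pos j) (le_refl _)

theorem pvCntGo_eq_occ (p : List Char) (hp : p ≠ []) (hb : pvNoBorder p) :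
    ∀ fuel l, l.length ≤ fuel → pvCntGo p fuel l = pvOcc p l := by
  intro fuel
  induction fuel with
  | zero =>
    intro l hl
    have : l = [] := by cases l with | nil => rfl | cons a t => simp at hl
    subst this; rfl
  | succ fuel ih =>
    intro l hl
    cases l with
    | nil => rfl
    | cons c rest =>
      have hplen : 0 < p.length := List.length_pos_iff.mpr hp
      by_cases hpre : p.isPrefixOf (c :: rest)
      · rw [pvCntGo, if_pos hpre, pvOcc_cons, if_pos hpre]
        have hdroplen : ((c :: rest).drop p.length).length ≤ fuel := by
          simp [List.length_drop] at *
          omega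
        rw [ih _ hdroplen]
        have hstab := pvOcc_drop_stable p (c :: rest) (p.length - 1)
          (fun i hi hij => pv_no_overlap hb (List.isPrefixOf_iff_prefix.mp hpre) hi (by omega))
        rw [Nat.sub_add_cancel hplen] at hstab
        simp only [List.drop_succ_cons, List.drop_zero] at hstab
        omega
      · rw [pvCntGo, if_neg hpre, pvOcc_cons, if_neg hpre, Nat.zero_add]
        exact ih rest (by simp at hl; omega)

theorem pv_splitOn_go_length (p : List Char) :
    ∀ fuel (l cur : List Char) (acc : List (List Char)),
      (PySem.Chars.splitOn.go p fuel l cur acc).length = acc.length + 1 + pvCntGo p fuel l := by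
  intro fuel
  induction fuel with
  | zero =>
    intro l cur acc
    simp [PySem.Chars.splitOn.go, pvCntGo]
  | succ fuel ih =>
    intro l cur acc
    cases l with
    | nil => simp [PySem.Chars.splitOn.go, pvCntGo]
    | cons c rest =>
      rw [PySem.Chars.splitOn.go]
      by_cases hpre : p.isPrefixOf (c :: rest)
      · rw [if_pos hpre, pvCntGo, if_pos hpre, ih]
        simp; omega
      · rw [if_neg hpre, pvCntGo, if_neg hpre, ih]

-- A's per-pattern value equals B's per-pattern occurrence count
theorem pv_split_occ (p m : List Char) (hp : p ≠ []) (hb : pvNoBorder p) :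
    ((PySem.Chars.splitOn m p).length : Int) - 1 = (pvOcc p m : Int) := by
  have h1 := pv_splitOn_go_length p (m.length + 1) m [] []
  have h2 := pvCntGo_eq_occ p hp hb (m.length + 1) m (by omega)
  unfold PySem.Chars.splitOn
  rw [h1, h2]
  simp

theorem pv_str_split_len (m emo : String) (h : emo.toList ≠ []) :
    ((PySem.Str.split? m emo).getD []).length = (PySem.Chars.splitOn m.toList emo.toList).length := by
  simp [PySem.Str.split?, PySem.Chars.split?, List.isEmpty_iff, h]

-- the common value: signed sum of the per-pattern occurrence counts in the lowered message
def pvE (m : List Char) : Int :=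
  (pvOcc ":)".toList m : Int) + (pvOcc ":p".toList m : Int) + (pvOcc "xd".toList m : Int)
  + (pvOcc ":3".toList m : Int) + (pvOcc "<3".toList m : Int) + (pvOcc "\\m/".toList m : Int)
  - (pvOcc ":(".toList m : Int) - (pvOcc ":'(".toList m : Int) - (pvOcc "t(-.-t)".toList m : Int)

theorem pv_key (m emo : String) (h1 : emo.toList ≠ []) (h2 : pvNoBorder emo.toList) :
    (((PySem.Str.split? m emo).getD []).length : Int) - 1 = (pvOcc emo.toList m.toList : Int) := by
  rw [pv_str_split_len _ _ h1]; exact pv_split_occ _ _ h1 h2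

theorem pv_A_eq (msg : String) :
    emoticons_mood msg = pvE (PySem.Str.lower msg).toList := by
  unfold emoticons_mood
  by_cases h0 : PySem.Str.len msg = 0
  · rw [if_pos h0]
    have : msg.toList = [] := by
      rw [PySem.Str.len_eq] at h0; simpa using h0
    simp [pvE, PySem.Str.toList_lower, this, PySem.Chars.lower, pvOcc]
  · rw [if_neg h0]
    simp only [pvHappy, pvSad, List.foldl]
    rw [pv_key _ _ (by decide) (by unfold pvNoBorder; decide),
        pv_key _ _ (by decide) (by unfold pvNoBorder; decide),
        pv_key _ _ (by decide) (by unfold pvNoBorder; decide),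
        pv_key _ _ (by decide) (by unfold pvNoBorder; decide),
        pv_key _ _ (by decide) (by unfold pvNoBorder; decide),
        pv_key _ _ (by decide) (by unfold pvNoBorder; decide),
        pv_key _ _ (by decide) (by unfold pvNoBorder; decide),
        pv_key _ _ (by decide) (by unfold pvNoBorder; decide),
        pv_key _ _ (by decide) (by unfold pvNoBorder; decide)]
    simp [pvE]

theorem pv_foldl_if_sub_one (l : List String) (p : String → Bool) (a : Int) :
    l.foldl (fun acc x => if p x then acc - 1 else acc) a = a - (l.countP p : Int) := by
  induction l generalizing a with
  | nil => simp
  | cons e t ih =>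
    rw [List.foldl_cons, ih, List.countP_cons]
    split_ifs with h <;> simp <;> omega

theorem pv_sum_map_sub (l : List Nat) (f g : Nat → Int) :
    (l.map (fun x => f x - g x)).sum = (l.map f).sum - (l.map g).sum := by
  induction l with
  | nil => simp
  | cons a t ih => simp [ih]; ring

-- double counting: summing the per-position pattern counts equals summing the per-pattern position counts
theorem pv_exchange (n : Nat) (L : List String) (P : Nat → String → Bool) :
    ((List.range n).map (fun j => (L.countP (P j) : Int))).sum
    = (L.map (fun emo => ((List.range n).countP (fun j => P j emo) : Int))).sum := by
  induction L with
  | nil => simp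
  | cons e t ih =>
    have h1 : ∀ j : Nat, ((e :: t).countP (P j) : Int)
        = (if P j e then (1:Int) else 0) + (t.countP (P j) : Int) := by
      intro j
      rw [List.countP_cons]
      split_ifs <;> simp <;> omega
    calc ((List.range n).map (fun j => ((e :: t).countP (P j) : Int))).sum
        = ((List.range n).map (fun j => (if P j e then (1:Int) else 0) + (t.countP (P j) : Int))).sum := by
          simp only [h1]
      _ = ((List.range n).map (fun j => if P j e then (1:Int) else 0)).sum
          + ((List.range n).map (fun j => (t.countP (P j) : Int))).sum :=
          PySem.List.sum_map_add_int _ _ _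
      _ = ((List.range n).countP (fun j => P j e) : Int)
          + ((t.map (fun emo => ((List.range n).countP (fun j => P j emo) : Int))).sum) := by
          rw [PySem.List.sum_map_ite_one_zero, ih]

-- one iteration of B's outer loop adds the per-position pattern balance
theorem pv_step (m : List Char) (acc : Int) (j : Nat) :
    (fun (score : Int) (i : Int) =>
      pvSad.foldl
        (fun s emo => if PySem.Chars.startswith (m.drop i.toNat) emo.toList then s - 1 else s)
        (pvHappy.foldl
          (fun s emo => if PySem.Chars.startswith (m.drop i.toNat) emo.toList then s + 1 else s) score))
      acc (↑j)
    = acc + ((pvHappy.countP (fun emo => PySem.Chars.startswith (m.drop j) emo.toList) : Int)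
      - (pvSad.countP (fun emo => PySem.Chars.startswith (m.drop j) emo.toList) : Int)) := by
  beta_reduce
  have hH : pvHappy.foldl
      (fun s emo => if PySem.Chars.startswith (List.drop (Int.toNat ((j : Nat) : Int)) m) emo.toList then s + 1 else s) acc
      = acc + (pvHappy.countP (fun emo => PySem.Chars.startswith (List.drop (Int.toNat ((j : Nat) : Int)) m) emo.toList) : Int) :=
    PySem.List.foldl_if_add_one _ _ _
  have hS : ∀ b : Int, pvSad.foldl
      (fun s emo => if PySem.Chars.startswith (List.drop (Int.toNat ((j : Nat) : Int)) m) emo.toList then s - 1 else s) b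
      = b - (pvSad.countP (fun emo => PySem.Chars.startswith (List.drop (Int.toNat ((j : Nat) : Int)) m) emo.toList) : Int) :=
    fun b => pv_foldl_if_sub_one _ _ b
  rw [hS, hH]
  simp only [Int.toNat_natCast]
  ring

theorem pv_B_eq (msg : String) :
    emoticons_mood_alt msg = pvE (PySem.Str.lower msg).toList := by
  unfold emoticons_mood_alt
  simp only []
  rw [PySem.List.pyRange_zero_natCast, List.foldl_map]
  rw [PySem.List.foldl_congr_mem _ _
    (fun acc j => acc + ((pvHappy.countP (fun emo => PySem.Chars.startswith ((PySem.Str.lower msg).toList.drop j) emo.toList) : Int)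
      - (pvSad.countP (fun emo => PySem.Chars.startswith ((PySem.Str.lower msg).toList.drop j) emo.toList) : Int))) _
    (fun acc j _ => pv_step (PySem.Str.lower msg).toList acc j)]
  rw [PySem.List.foldl_add]
  rw [pv_sum_map_sub, pv_exchange, pv_exchange]
  simp only [pvHappy, pvSad, List.map, List.sum_cons, List.sum_nil]
  simp only [pvE, pvOcc, PySem.Chars.startswith]
  ring

-- ===== VERDICT (by name: the statement is the Claim_ definition above) =====
theorem emoticons_mood_spec : Claim_equal_emoticons_mood := by
  intro message _
  unfold Spec_emoticons_mood
  rw [pv_A_eq, pv_B_eq]
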